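-- pv_equiv track=rewrite | github.com/soluzka/antivirus | security/c2_detector.py | _check_consonant_clusters
-- ===== SOURCE A (Python) =====
-- def _check_consonant_clusters(domain):
--     """Check for unusual consonant clusters"""
--     domain = domain.lower().split('.')[0]  # Remove TLD
--     consonants = 'bcdfghjklmnpqrstvwxyz'
--
--     # Count consonant sequences
--     max_consonant_seq = 0
--     current_seq = 0
--
--     for char in domain:
--         if char in consonants:
--             current_seq += 1
--             max_consonant_seq = max(max_consonant_seq, current_seq)
--         else:
--             current_seq = 0
--
--     return max_consonant_seq >= 4  # 4+ consonants in a row is unusual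
-- ===== SOURCE B (Python) =====
-- def _check_consonant_clusters(domain):
--     """Check for unusual consonant clusters"""
--     label = domain.lower().split('.')[0]  # Remove TLD
--     consonants = 'bcdfghjklmnpqrstvwxyz'
--     # Brute-force sliding-window check: some 4-character window is all consonants.
--     return any(all(c in consonants for c in label[i:i + 4])
--                for i in range(len(label) - 3))
-- ===== Notes on version B (the rewrite author's own statement) =====
-- stated objective: alternative
-- what changed: Replaces the running current_seq/max_consonant_seq counter loop with a brute-force sliding-window check: any 4-character window of the label consists entirely of consonants.
import Mathlib
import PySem

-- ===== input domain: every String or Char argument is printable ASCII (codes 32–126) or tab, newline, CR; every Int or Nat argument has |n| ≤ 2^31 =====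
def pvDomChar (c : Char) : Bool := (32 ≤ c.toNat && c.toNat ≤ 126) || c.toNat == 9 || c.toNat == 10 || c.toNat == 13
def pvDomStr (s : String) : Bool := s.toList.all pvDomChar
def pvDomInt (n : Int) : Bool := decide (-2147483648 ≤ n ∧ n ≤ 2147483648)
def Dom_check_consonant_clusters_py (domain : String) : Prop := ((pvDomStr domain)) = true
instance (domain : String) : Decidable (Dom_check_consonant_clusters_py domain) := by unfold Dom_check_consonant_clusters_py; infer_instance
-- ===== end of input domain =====

-- B replaces A's running-counter/running-maximum scan with a brute-force sliding-window
-- check (is some 4-character window all consonants?); objective: alternative, same cost.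

-- ===== PORT A =====
-- domain.lower().split('.')[0]: splitting on the nonempty separator '.' always yields
-- at least one piece, so the [0] index never raises; headD [] is exact here.
def check_consonant_clusters_py (domain : String) : Bool :=
  let d : List Char := (PySem.Chars.splitOn (PySem.Chars.lower domain.toList) ['.']).headD []
  let consonants : List Char := "bcdfghjklmnpqrstvwxyz".toList
  let r := d.foldl (fun (st : Nat × Nat) ch =>
      if consonants.contains ch then (max st.1 (st.2 + 1), st.2 + 1) else (st.1, 0)) (0, 0)
  decide (4 ≤ r.1)

-- ===== PORT B =====
-- Source B: any(all(c in consonants for c in label[i:i+4]) for i in range(len(label)-3));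
-- range → PySem.List.pyRange, label[i:i+4] → PySem.List.slice (both exact).
def check_consonant_clusters_py_alt (domain : String) : Bool :=
  let label : List Char := (PySem.Chars.splitOn (PySem.Chars.lower domain.toList) ['.']).headD []
  let consonants : List Char := "bcdfghjklmnpqrstvwxyz".toList
  (PySem.List.pyRange 0 ((label.length : Int) - 3) 1).any (fun i =>
    (PySem.List.slice label (some i) (some (i + 4))).all (fun c => consonants.contains c))

-- ===== PRECONDITION & SPEC =====
def Spec_check_consonant_clusters_py (domain : String) (out : Bool) : Prop := out = check_consonant_clusters_py_alt domain
instance (domain : String) (out : Bool) : Decidable (Spec_check_consonant_clusters_py domain out) := by unfold Spec_check_consonant_clusters_py; infer_instance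

-- ===== CLAIM (what is proved, stated in full; the proofs are below) =====
def Claim_equal_check_consonant_clusters_py : Prop := ∀ (domain : String), Dom_check_consonant_clusters_py domain → Spec_check_consonant_clusters_py domain (check_consonant_clusters_py domain)

-- ===== LEMMAS AND PROOFS =====

def pvIsCons (ch : Char) : Bool := ("bcdfghjklmnpqrstvwxyz".toList).contains ch

-- char-by-char scan with a credit c = length of the consonant run already in progress
def pvScanC : Nat → List Char → Bool
  | _, [] => false
  | c, ch :: t => if pvIsCons ch then (decide (4 ≤ c + 1) || pvScanC (c + 1) t) else pvScanC 0 t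

-- the first n characters exist and are consonants
def pvPrefN : Nat → List Char → Bool
  | 0, _ => true
  | _ + 1, [] => false
  | n + 1, ch :: t => pvIsCons ch && pvPrefN n t

theorem pv_prefN_mono (l : List Char) : ∀ {m n : Nat}, n ≤ m → pvPrefN m l = true → pvPrefN n l = true := by
  induction l with
  | nil =>
    intro m n h hm
    cases n with
    | zero => rfl
    | succ k => cases m with
      | zero => omega
      | succ j => simp [pvPrefN] at hm
  | cons ch t ih =>
    intro m n h hm
    cases n with
    | zero => rfl
    | succ k =>
      cases m with
      | zero => omega
      | succ j =>
        simp only [pvPrefN, Bool.and_eq_true] at hm ⊢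
        exact ⟨hm.1, ih (by omega) hm.2⟩

-- A's fold from any start state (m, c) reaches 4 iff m was already 4 or pvScanC c does
theorem pv_fold_char (cs : List Char) : ∀ m c : Nat,
    (4 ≤ (cs.foldl (fun (st : Nat × Nat) ch =>
      if ("bcdfghjklmnpqrstvwxyz".toList).contains ch then (max st.1 (st.2 + 1), st.2 + 1)
      else (st.1, 0)) (m, c)).1)
    ↔ (4 ≤ m ∨ pvScanC c cs = true) := by
  induction cs with
  | nil => intro m c; simp [pvScanC]
  | cons ch t ih =>
    intro m c
    simp only [List.foldl]
    cases h : ("bcdfghjklmnpqrstvwxyz".toList).contains ch with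
    | true =>
      simp only [pvScanC, pvIsCons, h, if_true, Bool.or_eq_true, decide_eq_true_eq]
      rw [ih]
      constructor
      · rintro (hm | hs)
        · by_cases hmm : 4 ≤ m
          · exact Or.inl hmm
          · right; left; omega
        · right; right; exact hs
      · rintro (hm | h1 | hs)
        · left; omega
        · left; omega
        · right; exact hs
    | false =>
      simp only [pvScanC, pvIsCons, h, Bool.false_eq_true, if_false]
      rw [ih]

-- pvScanC with credit c < 4: either the head prefix completes the run to 4,
-- or a full 4-run starts strictly later
theorem pv_scanC_iff (cs : List Char) : ∀ c : Nat, c < 4 →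
    (pvScanC c cs = true ↔
      (pvPrefN (4 - c) cs = true ∨ ∃ k, pvPrefN 4 (cs.drop (k + 1)) = true)) := by
  induction cs with
  | nil =>
    intro c hc
    have h4 : 4 - c = (3 - c) + 1 := by omega
    simp [pvScanC, h4, pvPrefN]
  | cons ch t ih =>
    intro c hc
    have h4 : 4 - c = (3 - c) + 1 := by omega
    cases h : pvIsCons ch with
    | false =>
      simp only [pvScanC, h, Bool.false_eq_true, if_false, h4, pvPrefN, Bool.false_and,
        List.drop_succ_cons]
      rw [ih 0 (by omega)]
      constructor
      · rintro (h1 | ⟨k, hk⟩)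
        · right; exact ⟨0, by simpa using h1⟩
        · right; exact ⟨k + 1, by simpa using hk⟩
      · rintro (h1 | ⟨k, hk⟩)
        · exact absurd h1 (by simp)
        · cases k with
          | zero => left; simpa using hk
          | succ k' => right; exact ⟨k', by simpa using hk⟩
    | true =>
      by_cases hc3 : c = 3
      · subst hc3
        simp only [pvScanC, h, if_true]
        constructor
        · intro _
          left
          simp [pvPrefN, h]
        · intro _; simp
      · simp only [pvScanC, h, if_true, Bool.or_eq_true, decide_eq_true_eq]
        have hlt : c + 1 < 4 := by omega
        have h41 : 4 - c = (4 - (c + 1)) + 1 := by omega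
        rw [ih (c + 1) hlt]
        simp only [h41, pvPrefN, h, Bool.true_and, List.drop_succ_cons]
        constructor
        · rintro (hb | h1 | ⟨k, hk⟩)
          · omega
          · exact Or.inl h1
          · right; exact ⟨k + 1, by simpa using hk⟩
        · rintro (h1 | ⟨k, hk⟩)
          · exact Or.inr (Or.inl h1)
          · cases k with
            | zero =>
              right; left
              exact pv_prefN_mono t (m := 4) (n := 4 - (c + 1)) (by omega) (by simpa using hk)
            | succ k' => right; right; exact ⟨k', by simpa using hk⟩

theorem pv_scanC_zero (cs : List Char) :
    pvScanC 0 cs = true ↔ ∃ k, pvPrefN 4 (cs.drop k) = true := by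
  rw [pv_scanC_iff cs 0 (by omega)]
  constructor
  · rintro (h1 | ⟨k, hk⟩)
    · exact ⟨0, by simpa using h1⟩
    · exact ⟨k + 1, hk⟩
  · rintro ⟨k, hk⟩
    cases k with
    | zero => left; simpa using hk
    | succ k' => right; exact ⟨k', hk⟩

-- pvPrefN n as "n characters exist and the first n are all consonants"
theorem pv_prefN_iff (l : List Char) : ∀ n : Nat,
    (pvPrefN n l = true ↔ n ≤ l.length ∧ ∀ c ∈ l.take n, pvIsCons c = true) := by
  induction l with
  | nil =>
    intro n
    cases n with
    | zero => simp [pvPrefN]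
    | succ k => simp [pvPrefN]
  | cons ch t ih =>
    intro n
    cases n with
    | zero => simp [pvPrefN]
    | succ k =>
      simp only [pvPrefN, Bool.and_eq_true, List.length_cons, List.take_succ_cons,
        List.mem_cons, forall_eq_or_imp]
      rw [ih k]
      constructor
      · rintro ⟨h1, h2, h3⟩; exact ⟨by omega, h1, h3⟩
      · rintro ⟨h1, h2, h3⟩; exact ⟨h2, by omega, h3⟩

-- B's window test: the any-over-range equals the existence of a 4-consonant window
theorem pv_window (cs : List Char) :
    ((PySem.List.pyRange 0 ((cs.length : Int) - 3) 1).any (fun i =>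
      (PySem.List.slice cs (some i) (some (i + 4))).all
        (fun c => ("bcdfghjklmnpqrstvwxyz".toList).contains c)) = true)
    ↔ ∃ k, pvPrefN 4 (cs.drop k) = true := by
  rw [List.any_eq_true]
  constructor
  · rintro ⟨i, hi, hall⟩
    rw [PySem.List.mem_pyRange_one] at hi
    obtain ⟨h0, hlt⟩ := hi
    obtain ⟨k, rfl⟩ : ∃ k : Nat, i = (k : Int) := ⟨i.toNat, (Int.toNat_of_nonneg h0).symm⟩
    refine ⟨k, (pv_prefN_iff _ 4).2 ⟨?_, ?_⟩⟩
    · simp only [List.length_drop]; omega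
    · intro c hc
      have hs : PySem.List.slice cs (some (k : Int)) (some ((k : Int) + (4 : Nat))) = (cs.drop k).take 4 :=
        PySem.List.slice_natCast_add cs k 4
      rw [List.all_eq_true] at hall
      exact hall c (by rw [show ((k : Int) + 4) = ((k : Int) + (4 : Nat)) by norm_num, hs] at hall ⊢; exact hc)
  · rintro ⟨k, hk⟩
    rw [pv_prefN_iff] at hk
    obtain ⟨hlen, hall⟩ := hk
    simp only [List.length_drop] at hlen
    refine ⟨(k : Int), ?_, ?_⟩
    · rw [PySem.List.mem_pyRange_one]
      constructor
      · exact Int.natCast_nonneg k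
      · omega
    · rw [List.all_eq_true]
      intro c hc
      have hs : PySem.List.slice cs (some (k : Int)) (some ((k : Int) + (4 : Nat))) = (cs.drop k).take 4 :=
        PySem.List.slice_natCast_add cs k 4
      rw [show ((k : Int) + 4) = ((k : Int) + (4 : Nat)) by norm_num, hs] at hc
      exact hall c hc

-- ===== VERDICT (by name: the statement is the Claim_ definition above) =====
theorem check_consonant_clusters_py_spec : Claim_equal_check_consonant_clusters_py := by
  intro domain _
  unfold Spec_check_consonant_clusters_py check_consonant_clusters_py check_consonant_clusters_py_alt
  rw [Bool.eq_iff_iff]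
  rw [decide_eq_true_eq, pv_fold_char _ 0 0, pv_window]
  rw [pv_scanC_zero]
  simp
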